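-- pv_equiv track=rewrite | github.com/ansible-collections/community.crypto | plugins/modules/openssh_cert.py | format_cert_info
-- ===== SOURCE A (Python) =====
-- def format_cert_info(cert_info):
--     result = []
--     string = ""
--
--     for word in cert_info.split():
--         if word in ("Type:", "Public", "Signing", "Key", "Serial:", "Valid:", "Principals:", "Critical", "Extensions:"):
--             result.append(string)
--             string = word
--         else:
--             string += " " + word
--     result.append(string)
--     # Drop the certificate path
--     result.pop(0)
--     return result
-- ===== SOURCE B (Python) =====
-- KEYWORDS = ("Type:", "Public", "Signing", "Key", "Serial:", "Valid:", "Principals:", "Critical", "Extensions:")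
--
--
-- def format_cert_info(cert_info):
--     words = cert_info.split()
--     bounds = [i for i, w in enumerate(words) if w in KEYWORDS]
--     ends = bounds[1:] + [len(words)]
--     return [" ".join(words[s:e]) for s, e in zip(bounds, ends)]
-- ===== Notes on version B (the rewrite author's own statement) =====
-- stated objective: alternative
-- what changed: Instead of one stateful loop growing a string accumulator and popping the path prefix afterwards, B computes the keyword boundary indices first and then joins the pairwise word slices, so no accumulator and no pop are needed.
import Mathlib
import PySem

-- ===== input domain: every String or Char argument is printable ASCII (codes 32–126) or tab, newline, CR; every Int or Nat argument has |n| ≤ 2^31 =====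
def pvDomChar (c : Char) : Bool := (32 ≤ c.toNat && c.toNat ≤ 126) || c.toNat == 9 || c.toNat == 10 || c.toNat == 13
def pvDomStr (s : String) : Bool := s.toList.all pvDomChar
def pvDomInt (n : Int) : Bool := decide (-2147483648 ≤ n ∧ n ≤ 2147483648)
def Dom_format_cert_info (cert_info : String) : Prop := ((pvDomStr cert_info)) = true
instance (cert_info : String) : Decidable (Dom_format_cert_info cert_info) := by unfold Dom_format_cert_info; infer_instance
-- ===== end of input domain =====

-- B replaces A's single stateful loop (string accumulator + trailing pop of the path prefix) by
-- computing the keyword boundary indices first and joining the pairwise word slices (objective: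
-- alternative decomposition, same O(n) cost).

-- The keyword tuple, shared module-level constant of both versions
def fciKW : List String :=
  ["Type:", "Public", "Signing", "Key", "Serial:", "Valid:", "Principals:", "Critical", "Extensions:"]

-- ===== PORT A =====
-- loop body: 'if word in (...): result.append(string); string = word  else: string += " " + word'
def fciStep (st : List String × String) (word : String) : List String × String :=
  if word ∈ fciKW then (st.1 ++ [st.2], word) else (st.1, st.2 ++ " " ++ word)

def format_cert_info (cert_info : String) : List String :=
  let st := (PySem.Str.split₀ cert_info).foldl fciStep ([], "")
  let result := st.1 ++ [st.2]
  -- result.pop(0); result  — result is provably nonempty, so pop(0) never raises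
  match PySem.List.pop? result 0 with
  | some (_, rest) => rest
  | none => []

-- ===== PORT B =====
def format_cert_info_alt (cert_info : String) : List String :=
  let words := PySem.Str.split₀ cert_info
  -- bounds = [i for i, w in enumerate(words) if w in KEYWORDS]
  let bounds := ((PySem.List.enumerate words).filter (fun p => p.2 ∈ fciKW)).map (·.1)
  -- ends = bounds[1:] + [len(words)]
  let ends := bounds.drop 1 ++ [(words.length : Int)]
  -- [" ".join(words[s:e]) for s, e in zip(bounds, ends)]
  (bounds.zip ends).map (fun p => PySem.Str.join " " (PySem.List.slice words (some p.1) (some p.2)))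

-- ===== PRECONDITION & SPEC =====
def Spec_format_cert_info (cert_info : String) (out : List String) : Prop := out = format_cert_info_alt cert_info
instance (cert_info : String) (out : List String) : Decidable (Spec_format_cert_info cert_info out) := by unfold Spec_format_cert_info; infer_instance

-- ===== CLAIM (what is proved, stated in full; the proofs are below) =====
def Claim_equal_format_cert_info : Prop := ∀ (cert_info : String), Dom_format_cert_info cert_info → Spec_format_cert_info cert_info (format_cert_info cert_info)

-- ===== LEMMAS AND PROOFS =====

-- the common specification both programs compute: the keyword-delimited segments of the word list
def fciGrow (acc : String) : List String → List String
  | [] => [acc]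
  | w :: ws => if w ∈ fciKW then acc :: fciGrow w ws else fciGrow (acc ++ " " ++ w) ws

def fciSegs : List String → List String
  | [] => []
  | w :: ws => if w ∈ fciKW then fciGrow w ws else fciSegs ws

-- A-side -----------------------------------------------------------------

lemma fciFoldl_shift (ws : List String) (res : List String) (s : String) :
    ws.foldl fciStep (res, s) =
      (res ++ (ws.foldl fciStep ([], s)).1, (ws.foldl fciStep ([], s)).2) := by
  induction ws generalizing res s with
  | nil => simp
  | cons w ws ih =>
    simp only [List.foldl_cons, fciStep]
    split
    · simp only [List.nil_append]
      rw [ih (res ++ [s]) w, ih [s] w, List.append_assoc]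
    · exact ih res (s ++ " " ++ w)

lemma fciFoldl_eq_grow (ws : List String) (s : String) :
    (ws.foldl fciStep ([], s)).1 ++ [(ws.foldl fciStep ([], s)).2] = fciGrow s ws := by
  induction ws generalizing s with
  | nil => simp [fciGrow]
  | cons w ws ih =>
    simp only [List.foldl_cons, fciStep, fciGrow]
    split
    · simp only [List.nil_append]
      rw [fciFoldl_shift ws [s] w]
      simp [← ih w]
    · exact ih _

lemma fciGrow_ne_nil (acc : String) (ws : List String) : fciGrow acc ws ≠ [] := by
  induction ws generalizing acc with
  | nil => simp [fciGrow]
  | cons w ws ih => simp only [fciGrow]; split <;> simp [ih]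

lemma fciGrow_tail (acc : String) (ws : List String) : (fciGrow acc ws).tail = fciSegs ws := by
  induction ws generalizing acc with
  | nil => simp [fciGrow, fciSegs]
  | cons w ws ih =>
    simp only [fciGrow, fciSegs]
    split
    · simp
    · exact ih _

lemma fciA_eq_segs (cert_info : String) :
    format_cert_info cert_info = fciSegs (PySem.Str.split₀ cert_info) := by
  unfold format_cert_info
  have h := fciFoldl_eq_grow (PySem.Str.split₀ cert_info) ""
  rcases hg : fciGrow "" (PySem.Str.split₀ cert_info) with _ | ⟨r, rs⟩
  · exact absurd hg (fciGrow_ne_nil _ _)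
  · have := fciGrow_tail "" (PySem.Str.split₀ cert_info)
    rw [hg] at h this
    simp only [h, PySem.List.pop?_zero_cons]
    simpa using this

-- B-side -----------------------------------------------------------------

def fciBnd (s : Int) (ws : List String) : List Int :=
  ((PySem.List.enumerate ws s).filter (fun p => p.2 ∈ fciKW)).map (·.1)

def fciBfun (ws : List String) : List String :=
  ((fciBnd 0 ws).zip ((fciBnd 0 ws).drop 1 ++ [(ws.length : Int)])).map
    (fun p => PySem.Str.join " " (PySem.List.slice ws (some p.1) (some p.2)))

lemma fciBnd_cons (s : Int) (w : String) (ws : List String) :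
    fciBnd s (w :: ws) = (if w ∈ fciKW then [s] else []) ++ fciBnd (s + 1) ws := by
  simp only [fciBnd, PySem.List.enumerate_cons, List.filter_cons]
  split <;> simp_all

lemma fciBnd_shift (s : Int) (ws : List String) :
    fciBnd s ws = (fciBnd 0 ws).map (fun i => s + i) := by
  induction ws generalizing s with
  | nil => simp [fciBnd]
  | cons w ws ih =>
    rw [fciBnd_cons, fciBnd_cons, ih (s + 1), ih (0 + 1)]
    split <;> simp [List.map_map, add_assoc]

lemma fciBnd_nonneg (ws : List String) : ∀ i ∈ fciBnd 0 ws, 0 ≤ i := by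
  intro i hi
  simp only [fciBnd, List.mem_map, List.mem_filter] at hi
  obtain ⟨p, ⟨hp, _⟩, rfl⟩ := hi
  rw [PySem.List.mem_enumerate_iff] at hp
  obtain ⟨k, _, rfl⟩ := hp
  simp

lemma fciSlice_shift (w : String) (ws : List String) (a b : Int) (ha : 0 ≤ a) (hb : 0 ≤ b) :
    PySem.List.slice (w :: ws) (some (1 + a)) (some (1 + b)) = PySem.List.slice ws (some a) (some b) := by
  rw [PySem.List.slice_toNat _ (by omega) (by omega), PySem.List.slice_toNat _ ha hb]
  have h1 : (1 + a).toNat = a.toNat + 1 := by omega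
  rw [h1]
  have h2 : (1 + b).toNat - (a.toNat + 1) = b.toNat - a.toNat := by omega
  rw [h2, List.drop_succ_cons]

lemma fciSegs_dropWhile (ws : List String) :
    fciSegs (ws.dropWhile (fun x => !decide (x ∈ fciKW))) = fciSegs ws := by
  induction ws with
  | nil => rfl
  | cons w ws ih =>
    by_cases h : w ∈ fciKW <;> simp [h, fciSegs, ih]

lemma fciGrow_eq (acc : String) (ws : List String) :
    fciGrow acc ws =
      (ws.takeWhile (fun x => !decide (x ∈ fciKW))).foldl (fun a x => a ++ " " ++ x) acc
        :: fciSegs (ws.dropWhile (fun x => !decide (x ∈ fciKW))) := by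
  induction ws generalizing acc with
  | nil => simp [fciGrow, fciSegs]
  | cons w ws ih =>
    by_cases h : w ∈ fciKW <;>
      simp [fciGrow, h, fciSegs, ih]

lemma fciJoin_foldl (acc : String) (l : List String) :
    PySem.Str.join " " (acc :: l) = l.foldl (fun a x => a ++ " " ++ x) acc := by
  induction l generalizing acc with
  | nil =>
    apply String.toList_inj.mp
    rw [PySem.Str.toList_join]
    simp [PySem.Chars.join_singleton]
  | cons x l ih =>
    rw [List.foldl_cons, ← ih (acc ++ " " ++ x)]
    apply String.toList_inj.mp
    rw [PySem.Str.toList_join, PySem.Str.toList_join]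
    cases l <;>
      simp [PySem.Chars.join_cons_cons, PySem.Chars.join_singleton, List.append_assoc]

lemma fciTake_headD (ws : List String) :
    List.take ((fciBnd 0 ws).headD (ws.length : Int)).toNat ws
      = ws.takeWhile (fun x => !decide (x ∈ fciKW)) := by
  induction ws with
  | nil => simp
  | cons w ws ih =>
    rw [fciBnd_cons]
    simp only [zero_add]
    rw [fciBnd_shift 1]
    by_cases h : w ∈ fciKW
    · simp [h]
    · have hD : ((fciBnd 0 ws).map (fun i => 1 + i)).headD ((w :: ws).length : Int)
          = 1 + (fciBnd 0 ws).headD (ws.length : Int) := by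
        cases fciBnd 0 ws with
        | nil => simp [List.length_cons]; ring
        | cons a t => simp
      have hnn : 0 ≤ (fciBnd 0 ws).headD (ws.length : Int) := by
        cases hb : fciBnd 0 ws with
        | nil => simp
        | cons a t => simpa using fciBnd_nonneg ws a (by rw [hb]; exact List.mem_cons_self)
      simp only [h, ite_false, List.nil_append, hD]
      have ht : (1 + (fciBnd 0 ws).headD (ws.length : Int)).toNat
          = ((fciBnd 0 ws).headD (ws.length : Int)).toNat + 1 := by omega
      rw [ht, List.take_succ_cons, ih, List.takeWhile_cons]
      simp [h]

lemma fciBfun_shift (w : String) (ws : List String) (bs : List Int) (hnn : ∀ i ∈ bs, 0 ≤ i) :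
    ((bs.map (fun i => 1 + i)).zip ((bs.map (fun i => 1 + i)).drop 1 ++ [((w :: ws).length : Int)])).map
        (fun p => PySem.Str.join " " (PySem.List.slice (w :: ws) (some p.1) (some p.2)))
      = (bs.zip (bs.drop 1 ++ [(ws.length : Int)])).map
        (fun p => PySem.Str.join " " (PySem.List.slice ws (some p.1) (some p.2))) := by
  have hlen : ((w :: ws).length : Int) = 1 + (ws.length : Int) := by
    simp [List.length_cons]; ring
  rw [hlen, ← List.map_drop]
  rw [show (List.map (fun i => (1 : Int) + i) (bs.drop 1) ++ [(1 : Int) + (ws.length : Int)])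
      = (bs.drop 1 ++ [(ws.length : Int)]).map (fun i => 1 + i) by simp]
  rw [List.zip_map, List.map_map]
  apply List.map_congr_left
  intro p hp
  obtain ⟨hp1, hp2⟩ := List.of_mem_zip hp
  have h1 : 0 ≤ p.1 := hnn _ hp1
  have h2 : 0 ≤ p.2 := by
    rcases List.mem_append.mp hp2 with h | h
    · exact hnn _ (List.mem_of_mem_drop h)
    · simp only [List.mem_singleton] at h; omega
  obtain ⟨a, b⟩ := p
  simp only [Function.comp_apply, Prod.map] at h1 h2 ⊢
  rw [fciSlice_shift w ws a b h1 h2]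

lemma fciZipCons (l : List Int) (m : Int) :
    (((0 : Int) :: l).zip (l ++ [m])) = ((0 : Int), l.headD m) :: l.zip (l.drop 1 ++ [m]) := by
  cases l <;> simp

lemma fciB_eq_segs (ws : List String) : fciBfun ws = fciSegs ws := by
  induction ws with
  | nil => rfl
  | cons w ws ih =>
    unfold fciBfun
    rw [fciBnd_cons]
    simp only [zero_add]
    rw [fciBnd_shift 1]
    have hnn := fciBnd_nonneg ws
    by_cases h : w ∈ fciKW
    · -- a segment starts at index 0; the rest shifts down by one
      simp only [h, ite_true, List.singleton_append, List.drop_succ_cons, List.drop_zero]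
      rw [fciZipCons, List.map_cons]
      have hnnD : 0 ≤ (fciBnd 0 ws).headD (ws.length : Int) := by
        cases hb : fciBnd 0 ws with
        | nil => simp
        | cons a t => simpa using hnn a (by rw [hb]; exact List.mem_cons_self)
      have hD : (List.map (fun i => (1 : Int) + i) (fciBnd 0 ws)).headD (((w :: ws).length : Nat) : Int)
          = 1 + (fciBnd 0 ws).headD (ws.length : Int) := by
        cases fciBnd 0 ws with
        | nil => simp [List.length_cons]; ring
        | cons a t => simp
      rw [hD, PySem.List.slice_zero_start, PySem.List.slice_to _ (by omega)]
      rw [show (1 + (fciBnd 0 ws).headD (ws.length : Int)).toNat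
          = ((fciBnd 0 ws).headD (ws.length : Int)).toNat + 1 from by omega]
      rw [List.take_succ_cons, fciTake_headD ws]
      rw [fciBfun_shift w ws (fciBnd 0 ws) hnn]
      unfold fciBfun at ih
      rw [ih, fciSegs, if_pos h, fciGrow_eq, ← fciJoin_foldl, fciSegs_dropWhile]
    · -- w is not a keyword: it belongs to the dropped path prefix
      simp only [h, ite_false, List.nil_append]
      rw [fciBfun_shift w ws (fciBnd 0 ws) hnn]
      unfold fciBfun at ih
      rw [ih, fciSegs, if_neg h]

-- ===== VERDICT (by name: the statement is the Claim_ definition above) =====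
theorem format_cert_info_spec : Claim_equal_format_cert_info := by
  intro cert_info _
  show _ = _
  rw [fciA_eq_segs]
  show fciSegs _ = fciBfun (PySem.Str.split₀ cert_info)
  rw [fciB_eq_segs]
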